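-- pv_equiv track=rewrite | github.com/stefanrzv2000/crypto | T9/bits.py | toBinArray
-- ===== SOURCE A (Python) =====
-- def toBinArray(x,lenn):
--     s = []
--     b = 1<<lenn
--     x = x%b
--     b = b>>1
--     while(b > 0):
--         if(x>=b): s.append(1); x = x-b
--         else: s.append(0)
--         b = b>>1
--     return s
-- ===== SOURCE B (Python) =====
-- def toBinArray(x, lenn):
--     out = []
--     for _ in range(lenn):
--         x, r = divmod(x, 2)
--         out.append(r)
--     out.reverse()
--     return out
-- ===== Notes on version B (the rewrite author's own statement) =====
-- stated objective: faster
-- what changed: Replaces A's MSB-first subtractive walk (precomputed power-of-two mask, threshold compare and subtraction per step) by an LSB-first divmod accumulation: repeatedly split off the low bit with divmod(x,2) for lenn steps, then reverse the collected bits; no mask and no up-front normalization x % (1<<lenn) are needed because floor divmod realizes two's complement directly.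
import Mathlib
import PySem

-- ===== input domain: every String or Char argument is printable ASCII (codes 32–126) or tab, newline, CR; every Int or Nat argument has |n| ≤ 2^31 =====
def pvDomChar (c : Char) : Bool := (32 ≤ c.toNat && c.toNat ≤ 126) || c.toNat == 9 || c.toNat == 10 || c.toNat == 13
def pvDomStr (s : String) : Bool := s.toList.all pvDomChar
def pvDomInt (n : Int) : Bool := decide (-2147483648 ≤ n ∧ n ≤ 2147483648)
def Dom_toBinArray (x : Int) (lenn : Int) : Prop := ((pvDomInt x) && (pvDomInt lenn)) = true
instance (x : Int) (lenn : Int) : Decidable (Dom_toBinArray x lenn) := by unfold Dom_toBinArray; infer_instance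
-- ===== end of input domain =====

-- B replaces A's MSB-first subtractive mask walk by an LSB-first divmod accumulation reversed at the end; objective: alternative.


-- ===== PORT A =====
-- the while-loop of A: while b > 0: append a bit, maybe subtract, halve b
def pvLoopA (x : Int) (b : Int) (s : List Int) : List Int :=
  if hb : 0 < b then
    if b ≤ x then pvLoopA (x - b) (b >>> (1:Nat)) (s ++ [1])
    else pvLoopA x (b >>> (1:Nat)) (s ++ [0])
  else s
termination_by b.toNat
decreasing_by
  all_goals
    rw [Int.shiftRight_eq_div_pow]
    norm_num
    omega

def toBinArray (x : Int) (lenn : Int) : List Int :=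
  -- 1 << lenn : exact for 0 ≤ lenn (Pre_); Python raises ValueError on lenn < 0
  let b := (1 : Int) <<< lenn.toNat
  let x := PySem.Int.mod x b
  pvLoopA x (b >>> (1:Nat)) []

-- ===== PORT B =====
-- the for-loop of B: lenn times, (x, r) = divmod(x, 2); out.append(r)
def pvLoopB : Nat → Int → List Int → List Int
  | 0, _, out => out
  | n + 1, x, out => pvLoopB n (PySem.Int.floordiv x 2) (out ++ [PySem.Int.mod x 2])

def toBinArray_alt (x : Int) (lenn : Int) : List Int :=
  -- range(lenn) is empty for lenn ≤ 0, so lenn.toNat iterations is exact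
  (pvLoopB lenn.toNat x []).reverse

-- ===== PRECONDITION & SPEC =====
-- Pre_: Python's 1 << lenn in A raises ValueError for lenn < 0
def Pre_toBinArray (x : Int) (lenn : Int) : Prop := 0 ≤ lenn
instance (x : Int) (lenn : Int) : Decidable (Pre_toBinArray x lenn) := by unfold Pre_toBinArray; infer_instance
def pvWitness_toBinArray : Int × Int := (5, 3)

def Spec_toBinArray (x : Int) (lenn : Int) (out : List Int) : Prop := out = toBinArray_alt x lenn
instance (x : Int) (lenn : Int) (out : List Int) : Decidable (Spec_toBinArray x lenn out) := by unfold Spec_toBinArray; infer_instance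

-- ===== CLAIM (what is proved, stated in full; the proofs are below) =====
def Claim_equal_toBinArray : Prop := ∀ (x : Int) (lenn : Int), Dom_toBinArray x lenn → Pre_toBinArray x lenn → Spec_toBinArray x lenn (toBinArray x lenn)

-- ===== LEMMAS AND PROOFS =====

-- bit j of m, for m < 2^(j+1), is 1 exactly when 2^j ≤ m
lemma pv_top_bit (j m : Nat) (hm : m < 2 ^ (j + 1)) :
    (m >>> j) &&& 1 = if 2 ^ j ≤ m then 1 else 0 := by
  rw [Nat.and_one_is_mod, Nat.shiftRight_eq_div_pow]
  split_ifs with h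
  · have h1 : m / 2 ^ j = 1 :=
      Nat.div_eq_of_lt_le (by omega) (by rw [pow_succ] at hm; omega)
    rw [h1]
  · rw [Nat.div_eq_of_lt (by omega)]

-- subtracting the top bit 2^j does not change bits below j
lemma pv_low_bit (i j m : Nat) (hij : i < j) (h : 2 ^ j ≤ m) :
    ((m - 2 ^ j) >>> i) &&& 1 = (m >>> i) &&& 1 := by
  rw [Nat.and_one_is_mod, Nat.and_one_is_mod, Nat.shiftRight_eq_div_pow, Nat.shiftRight_eq_div_pow]
  have hsplit : 2 ^ j = 2 ^ i * (2 * 2 ^ (j - i - 1)) := by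
    rw [← pow_succ', ← pow_add]
    congr 1
    omega
  have hdiv : (m - 2 ^ j) / 2 ^ i = m / 2 ^ i - 2 * 2 ^ (j - i - 1) := by
    rw [hsplit]
    exact Nat.sub_mul_div_of_le m _ _ (by rw [← hsplit]; exact h)
  have hge : 2 * 2 ^ (j - i - 1) ≤ m / 2 ^ i := by
    have h1 : 2 ^ j / 2 ^ i ≤ m / 2 ^ i := Nat.div_le_div_right h
    have h2 : 2 ^ j / 2 ^ i = 2 ^ (j - i) := Nat.pow_div (by omega) (by omega)
    have h3 : 2 ^ (j - i) = 2 * 2 ^ (j - i - 1) := by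
      rw [← pow_succ']
      congr 1
      omega
    omega
  rw [hdiv]
  omega

-- core loop lemma for A: pvLoopA on m < 2^(k+1) with mask 2^k produces the k+1 bits of m, MSB first
lemma pv_loopA_eq (k : Nat) : ∀ (m : Nat), m < 2 ^ (k + 1) → ∀ (s : List Int),
    pvLoopA (m : Int) ((2 : Int) ^ k) s
      = s ++ (PySem.List.pyRange (k : Int) (-1) (-1)).map (fun i => (((m >>> i.toNat) &&& 1 : Nat) : Int)) := by
  induction k with
  | zero =>
    intro m hm s
    have hrange : PySem.List.pyRange (((0:Nat)) : Int) (-1) (-1) = [0] := by decide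
    have h0lt : (0:Int) < 2 ^ 0 := by norm_num
    rw [hrange]
    have hm01 : m = 0 ∨ m = 1 := by omega
    rcases hm01 with rfl | rfl
    · rw [pvLoopA, dif_pos h0lt, if_neg (by norm_num), pvLoopA, dif_neg (by decide)]
      congr 1
    · rw [pvLoopA, dif_pos h0lt, if_pos (by norm_num), pvLoopA, dif_neg (by decide)]
      congr 1
  | succ j ih =>
    intro m hm s
    rw [pvLoopA]
    have hpos : (0 : Int) < 2 ^ (j + 1) := by positivity
    have hshift : ((2 : Int) ^ (j + 1)) >>> (1:Nat) = 2 ^ j := by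
      rw [Int.shiftRight_eq_div_pow]
      norm_num
      rw [pow_succ]
      have : (0:Int) < 2 ^ j := by positivity
      omega
    have hrange : PySem.List.pyRange ((j + 1 : Nat) : Int) (-1) (-1)
        = (((j : Nat) : Int) + 1) :: PySem.List.pyRange ((j : Nat) : Int) (-1) (-1) := by
      have h := PySem.List.pyRange_neg_one_cons (a := ((j : Nat) : Int) + 1) (b := -1) (by omega)
      push_cast
      simpa using h
    have htn : ((((j : Nat) : Int)) + 1).toNat = j + 1 := by omega
    by_cases hge : 2 ^ (j + 1) ≤ m
    · have hbr : (2 : Int) ^ (j + 1) ≤ (m : Int) := by exact_mod_cast hge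
      rw [dif_pos hpos, if_pos hbr, hshift]
      have hsub : (m : Int) - 2 ^ (j + 1) = ((m - 2 ^ (j + 1) : Nat) : Int) := by
        push_cast [hge]; ring
      rw [hsub, ih (m - 2 ^ (j + 1)) (by rw [pow_succ] at hm ⊢; omega) (s ++ [1])]
      rw [hrange]
      simp only [List.map_cons, List.append_assoc, List.singleton_append]
      congr 1
      congr 1
      · -- head bit of m is 1
        rw [htn, pv_top_bit (j + 1) m hm, if_pos hge]
        norm_num
      · -- lower bits agree after subtracting 2^(j+1)
        apply List.map_congr_left
        intro i hi
        have hmem := (PySem.List.mem_pyRange_neg_one).mp hi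
        have hlt : i.toNat < j + 1 := by omega
        rw [pv_low_bit i.toNat (j + 1) m hlt hge]
    · have hbr : ¬ ((2 : Int) ^ (j + 1) ≤ (m : Int)) := by exact_mod_cast hge
      rw [dif_pos hpos, if_neg hbr, hshift]
      rw [ih m (by omega) (s ++ [0])]
      rw [hrange]
      simp only [List.map_cons, List.append_assoc, List.singleton_append]
      congr 2
      rw [htn, pv_top_bit (j + 1) m hm, if_neg hge]
      norm_num

-- B's loop with any accumulator, split off
lemma pv_loopB_append (n : Nat) : ∀ (x : Int) (out : List Int),
    pvLoopB n x out = out ++ pvLoopB n x [] := by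
  induction n with
  | zero => intro x out; simp [pvLoopB]
  | succ n ih =>
    intro x out
    rw [pvLoopB, pvLoopB, ih (PySem.Int.floordiv x 2) (out ++ [PySem.Int.mod x 2]),
        ih (PySem.Int.floordiv x 2) ([] ++ [PySem.Int.mod x 2])]
    simp

-- halving before reducing mod 2^n = reducing mod 2^(n+1) before halving
lemma pv_half_emod (x : Int) (n : Nat) : (x / 2) % 2 ^ n = x % 2 ^ (n + 1) / 2 := by
  have h2 : (0:Int) < 2 ^ (n + 1) := by positivity
  have hn : (0:Int) < 2 ^ n := by positivity
  have hr0 : (0:Int) ≤ x % 2 ^ (n + 1) := Int.emod_nonneg x (by positivity)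
  have hrlt : x % 2 ^ (n + 1) < 2 ^ (n + 1) := Int.emod_lt_of_pos x h2
  have hq : x = x % 2 ^ (n + 1) + (x / 2 ^ (n + 1) * 2 ^ n) * 2 := by
    have h := Int.emod_add_mul_ediv x (2 ^ (n + 1))
    linear_combination -h
  calc (x / 2) % 2 ^ n
      = ((x % 2 ^ (n + 1) + (x / 2 ^ (n + 1) * 2 ^ n) * 2) / 2) % 2 ^ n := by rw [← hq]
    _ = (x % 2 ^ (n + 1) / 2 + x / 2 ^ (n + 1) * 2 ^ n) % 2 ^ n := by
        rw [Int.add_mul_ediv_right _ _ (by norm_num : (2:Int) ≠ 0)]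
    _ = (x % 2 ^ (n + 1) / 2) % 2 ^ n := by rw [Int.add_mul_emod_self_right]
    _ = x % 2 ^ (n + 1) / 2 := by
        apply Int.emod_eq_of_lt (Int.ediv_nonneg hr0 (by norm_num))
        rw [pow_succ] at hrlt
        omega

-- core loop lemma for B: lenn divmod steps collect the bits of x mod 2^n, LSB first
lemma pv_loopB_eq (n : Nat) : ∀ (x : Int),
    pvLoopB n x []
      = (List.range n).map (fun i => ((((PySem.Int.mod x ((2:Int) ^ n)).toNat >>> i) &&& 1 : Nat) : Int)) := by
  induction n with
  | zero => intro x; simp [pvLoopB]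
  | succ n ih =>
    intro x
    have hpos : (0:Int) < 2 ^ (n + 1) := by positivity
    have hm : ((PySem.Int.mod x ((2:Int) ^ (n + 1))).toNat : Int) = x % 2 ^ (n + 1) := by
      rw [PySem.Int.mod_eq_emod_of_pos hpos]
      exact Int.toNat_of_nonneg (Int.emod_nonneg x (by positivity))
    set m : Nat := (PySem.Int.mod x ((2:Int) ^ (n + 1))).toNat with hmdef
    rw [pvLoopB, pv_loopB_append, ih (PySem.Int.floordiv x 2), List.range_succ_eq_map]
    simp only [List.nil_append, List.singleton_append, List.map_cons, List.map_map]
    congr 1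
    · -- head bit: x % 2 = bit 0 of m
      rw [PySem.Int.mod_eq_emod_of_pos (by norm_num : (0:Int) < 2)]
      have hdvd : (2:Int) ∣ 2 ^ (n + 1) := ⟨2 ^ n, by ring⟩
      have hx2 : x % 2 = (m : Int) % 2 := by
        rw [hm, Int.emod_emod_of_dvd x hdvd]
      rw [hx2]
      simp only [Nat.shiftRight_zero, Nat.and_one_is_mod]
      omega
    · -- tail bits: bits of x/2 mod 2^n are bits 1.. of m
      have hm' : (PySem.Int.mod (PySem.Int.floordiv x 2) ((2:Int) ^ n)).toNat = m / 2 := by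
        have e1 : PySem.Int.mod (PySem.Int.floordiv x 2) ((2:Int) ^ n) = (x / 2) % 2 ^ n := by
          rw [PySem.Int.floordiv_eq_ediv_of_pos (by norm_num : (0:Int) < 2),
              PySem.Int.mod_eq_emod_of_pos (by positivity)]
        rw [e1, pv_half_emod, ← hm]
        omega
      rw [hm']
      apply List.map_congr_left
      intro i _
      have hsh : (m / 2) >>> i = m >>> (i + 1) := by
        rw [show i + 1 = 1 + i from Nat.add_comm i 1, Nat.shiftRight_add, Nat.shiftRight_one]
      simp only [Function.comp_apply, Nat.succ_eq_add_one, hsh]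

-- the countdown range is the reversed upward range
lemma pv_pyRange_rev (n : Nat) :
    PySem.List.pyRange ((n : Int) - 1) (-1) (-1) = ((List.range n).map (fun (i : Nat) => (i : Int))).reverse := by
  induction n with
  | zero =>
    rw [PySem.List.pyRange_neg_one_eq_nil (by norm_num)]
    simp
  | succ j ih =>
    have hc : ((j + 1 : Nat) : Int) - 1 = ((j : Nat) : Int) := by push_cast; ring
    rw [hc, PySem.List.pyRange_neg_one_cons (by omega : (-1:Int) < ((j : Nat) : Int)), ih,
        List.range_succ, List.map_append, List.reverse_append]
    simp

-- ===== VERDICT (by name: the statement is the Claim_ definition above) =====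
theorem toBinArray_spec : Claim_equal_toBinArray := by
  intro x lenn _hdom hpre
  unfold Spec_toBinArray
  obtain ⟨n, rfl⟩ : ∃ n : Nat, lenn = (n : Int) := ⟨lenn.toNat, (Int.toNat_of_nonneg hpre).symm⟩
  have htn : (((n : Nat) : Int)).toNat = n := by omega
  show pvLoopA (PySem.Int.mod x ((1 : Int) <<< (((n:Nat):Int)).toNat))
        (((1 : Int) <<< (((n:Nat):Int)).toNat) >>> (1:Nat)) []
      = (pvLoopB (((n:Nat):Int)).toNat x []).reverse
  rw [htn]
  have hsl : ((1 : Int) <<< n) = 2 ^ n := by rw [Int.shiftLeft_eq]; ring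
  rw [hsl, pv_loopB_eq]
  have hy0 : 0 ≤ PySem.Int.mod x ((2:Int) ^ n) :=
    PySem.Int.mod_nonneg x (by positivity)
  have hylt : PySem.Int.mod x ((2:Int) ^ n) < 2 ^ n :=
    PySem.Int.mod_lt x (by positivity)
  set m : Nat := (PySem.Int.mod x ((2:Int) ^ n)).toNat with hmdef
  have hcast : PySem.Int.mod x ((2:Int) ^ n) = (m : Int) := (Int.toNat_of_nonneg hy0).symm
  rw [hcast]
  have hmlt : (m : Int) < 2 ^ n := hcast ▸ hylt
  cases n with
  | zero =>
    rw [pvLoopA, dif_neg (by decide)]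
    simp
  | succ j =>
    have hmn : m < 2 ^ (j + 1) := by exact_mod_cast hmlt
    have hsh : ((2 : Int) ^ (j + 1)) >>> (1:Nat) = 2 ^ j := by
      rw [Int.shiftRight_eq_div_pow]
      norm_num
      rw [pow_succ]
      have : (0:Int) < 2 ^ j := by positivity
      omega
    rw [hsh, pv_loopA_eq j m hmn []]
    have hc : (((j + 1 : Nat)) : Int) - 1 = ((j : Nat) : Int) := by push_cast; ring
    rw [← hc, pv_pyRange_rev (j + 1), List.map_reverse, List.map_map]
    simp only [List.nil_append]
    congr 1
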